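-- pv_equiv track=rewrite | github.com/see-mike-out/qc-widget-prototypes-public | match_circuit.py | reverse_path_score
-- ===== SOURCE A (Python) =====
-- def reverse_path_score(paths):
--     r_score = 0
--     if len(paths) <= 1:
--         return 0
--     for i in range(1, len(paths)):
--         prev = paths[i-1]
--         this = paths[i]
--         if this[0] < prev[0]:
--             r_score = prev[0] - this[0]
--     return r_score
-- ===== SOURCE B (Python) =====
-- def reverse_path_score(paths):
--     # Backward scan: the first descending consecutive pair found from the end
--     # is exactly the last one A's forward overwrite keeps.
--     for i in range(len(paths) - 1, 0, -1):
--         if paths[i][0] < paths[i - 1][0]: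
--             return paths[i - 1][0] - paths[i][0]
--     return 0
-- ===== Notes on version B (the rewrite author's own statement) =====
-- stated objective: alternative
-- what changed: Replaces A's forward accumulate-and-overwrite loop with a backward scan that short-circuits at the first (i.e. last-in-order) descending consecutive pair.
import Mathlib
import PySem

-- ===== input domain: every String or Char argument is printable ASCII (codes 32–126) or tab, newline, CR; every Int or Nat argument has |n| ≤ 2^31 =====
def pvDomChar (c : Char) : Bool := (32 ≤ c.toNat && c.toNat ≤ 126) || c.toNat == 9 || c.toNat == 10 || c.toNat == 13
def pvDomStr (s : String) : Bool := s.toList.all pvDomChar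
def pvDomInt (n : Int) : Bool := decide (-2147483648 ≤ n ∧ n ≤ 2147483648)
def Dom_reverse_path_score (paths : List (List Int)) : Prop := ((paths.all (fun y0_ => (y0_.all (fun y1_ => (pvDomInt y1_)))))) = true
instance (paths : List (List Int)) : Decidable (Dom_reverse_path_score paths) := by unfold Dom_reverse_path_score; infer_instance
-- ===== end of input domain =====

-- B replaces A's forward overwrite loop with a backward early-exit scan; same values, alternative decomposition.

-- ===== PORT A =====
def reverse_path_score (paths : List (List Int)) : Int :=
  if paths.length ≤ 1 then 0
  else
    (PySem.List.pyRange 1 (paths.length : Int) 1).foldl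
      (fun r_score i =>
        let prev := PySem.List.pyGetD paths (i - 1) []
        let this := PySem.List.pyGetD paths i []
        if PySem.List.pyGetD this 0 0 < PySem.List.pyGetD prev 0 0 then
          PySem.List.pyGetD prev 0 0 - PySem.List.pyGetD this 0 0
        else r_score) 0

-- ===== PORT B =====
-- loop over the countdown range, returning at the first descending pair
def pvAltGo (paths : List (List Int)) : List Int → Int
  | [] => 0
  | i :: rest =>
    if PySem.List.pyGetD (PySem.List.pyGetD paths i []) 0 0 <
       PySem.List.pyGetD (PySem.List.pyGetD paths (i - 1) []) 0 0 then
      PySem.List.pyGetD (PySem.List.pyGetD paths (i - 1) []) 0 0 -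
      PySem.List.pyGetD (PySem.List.pyGetD paths i []) 0 0
    else pvAltGo paths rest

def reverse_path_score_alt (paths : List (List Int)) : Int :=
  pvAltGo paths (PySem.List.pyRange ((paths.length : Int) - 1) 0 (-1))

-- ===== PRECONDITION & SPEC =====
-- Pre_ excludes exactly the inputs where Python A raises IndexError: more than one
-- path and some path empty (then paths[i][0] fails).
def Pre_reverse_path_score (paths : List (List Int)) : Prop :=
  paths.length ≤ 1 ∨ ∀ p ∈ paths, p ≠ []
instance (paths : List (List Int)) : Decidable (Pre_reverse_path_score paths) := by
  unfold Pre_reverse_path_score; infer_instance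

def pvWitness_reverse_path_score : List (List Int) := [[3], [1], [2]]

def Spec_reverse_path_score (paths : List (List Int)) (out : Int) : Prop := out = reverse_path_score_alt paths
instance (paths : List (List Int)) (out : Int) : Decidable (Spec_reverse_path_score paths out) := by unfold Spec_reverse_path_score; infer_instance

-- ===== CLAIM (what is proved, stated in full; the proofs are below) =====
def Claim_equal_reverse_path_score : Prop := ∀ (paths : List (List Int)), Dom_reverse_path_score paths → Pre_reverse_path_score paths → Spec_reverse_path_score paths (reverse_path_score paths)

-- ===== LEMMAS AND PROOFS =====

-- accumulator-generalized version of pvAltGo, for the proof only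
def pvGo (paths : List (List Int)) (a : Int) : List Int → Int
  | [] => a
  | i :: rest =>
    if PySem.List.pyGetD (PySem.List.pyGetD paths i []) 0 0 <
       PySem.List.pyGetD (PySem.List.pyGetD paths (i - 1) []) 0 0 then
      PySem.List.pyGetD (PySem.List.pyGetD paths (i - 1) []) 0 0 -
      PySem.List.pyGetD (PySem.List.pyGetD paths i []) 0 0
    else pvGo paths a rest

theorem pvAltGo_eq_go (paths : List (List Int)) (l : List Int) :
    pvAltGo paths l = pvGo paths 0 l := by
  induction l with
  | nil => rfl
  | cons y u ih => simp only [pvAltGo, pvGo, ih]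

theorem pvGo_append (paths : List (List Int)) (u : List Int) (x a : Int) :
    pvGo paths a (u ++ [x]) =
      pvGo paths
        (if PySem.List.pyGetD (PySem.List.pyGetD paths x []) 0 0 <
            PySem.List.pyGetD (PySem.List.pyGetD paths (x - 1) []) 0 0 then
          PySem.List.pyGetD (PySem.List.pyGetD paths (x - 1) []) 0 0 -
          PySem.List.pyGetD (PySem.List.pyGetD paths x []) 0 0
        else a) u := by
  induction u with
  | nil => simp only [List.nil_append, pvGo]
  | cons y u ih => simp only [List.cons_append, pvGo, ih]

-- A's overwrite fold over l equals B's first-match scan over l.reverse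
theorem pvFold_eq_go (paths : List (List Int)) (l : List Int) : ∀ a : Int,
    l.foldl (fun r_score i =>
        let prev := PySem.List.pyGetD paths (i - 1) []
        let this := PySem.List.pyGetD paths i []
        if PySem.List.pyGetD this 0 0 < PySem.List.pyGetD prev 0 0 then
          PySem.List.pyGetD prev 0 0 - PySem.List.pyGetD this 0 0
        else r_score) a = pvGo paths a l.reverse := by
  induction l with
  | nil => intro a; rfl
  | cons y u ih =>
    intro a
    rw [List.foldl_cons, List.reverse_cons, pvGo_append, ← ih]

-- ===== VERDICT (by name: the statement is the Claim_ definition above) =====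
theorem reverse_path_score_spec : Claim_equal_reverse_path_score := by
  intro paths _ _
  unfold Spec_reverse_path_score reverse_path_score reverse_path_score_alt
  by_cases h : paths.length ≤ 1
  · rw [if_pos h]
    rw [PySem.List.pyRange_neg_one_eq_nil (by omega : (paths.length : Int) - 1 ≤ 0)]
    rfl
  · rw [if_neg h]
    have hrev : PySem.List.pyRange ((paths.length : Int) - 1) 0 (-1)
        = (PySem.List.pyRange 1 (paths.length : Int) 1).reverse := by
      have := PySem.List.pyRange_neg_one_eq_reverse ((paths.length : Int) - 1) 0
      simpa using this
    rw [hrev, pvAltGo_eq_go, ← pvFold_eq_go]
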